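-- pv_equiv track=rewrite | github.com/nitin22032002/leetcode_question | GCD Array - GFG/gcd-array.py | get
-- ===== SOURCE A (Python) =====
-- def get(arr,K,N,item):
--         s=0
--         i=0
--         while(i<N and K>0):
--             s+=arr[i]
--             if(K!=1 and s%item==0):
--                 K-=1
--                 s=0
--                 if(i==N-1):K+=1
--             i+=1
--         if(s%item==0 and K==1):
--             return True
--         return False
-- ===== SOURCE B (Python) =====
-- def get(arr, K, N, item):
--     # Count the valid cut points (prefix sums divisible by item, last index
--     # excluded), then decide arithmetically; no scan is needed when K <= 0.
--     total = 0
--     cnt = 0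
--     if K > 0:
--         for i in range(N):
--             total += arr[i]
--             if i != N - 1 and total % item == 0:
--                 cnt += 1
--     return total % item == 0 and K >= 1 and cnt >= K - 1
-- ===== Notes on version B (the rewrite author's own statement) =====
-- stated objective: simpler
-- what changed: Replaces A's greedy cut/reset-and-undo state machine (running segment sum reset at each cut, K decremented, last-index undo) with one pass that keeps the cumulative prefix sum, counts cut points (prefix sums divisible by item, excluding the last index) and returns total % item == 0 and K >= 1 and cnt >= K-1.
import Mathlib
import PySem

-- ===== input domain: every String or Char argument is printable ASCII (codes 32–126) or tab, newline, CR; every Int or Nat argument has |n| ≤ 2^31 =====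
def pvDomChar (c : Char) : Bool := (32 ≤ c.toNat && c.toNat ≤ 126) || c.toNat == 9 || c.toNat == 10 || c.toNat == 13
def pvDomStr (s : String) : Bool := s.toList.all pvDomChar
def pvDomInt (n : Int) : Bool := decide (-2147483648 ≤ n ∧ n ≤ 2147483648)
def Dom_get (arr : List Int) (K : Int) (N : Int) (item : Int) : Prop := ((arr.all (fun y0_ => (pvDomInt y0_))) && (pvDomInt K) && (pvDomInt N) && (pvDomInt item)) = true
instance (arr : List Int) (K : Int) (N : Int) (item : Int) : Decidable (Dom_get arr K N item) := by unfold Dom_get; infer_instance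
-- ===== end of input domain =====

-- B replaces A's greedy cut/reset state machine by one pass that counts the valid
-- cut points (prefix sums divisible by item, excluding the last index) and decides
-- arithmetically; objective: simpler.


-- ===== PORT A =====
-- A's while loop, state (s, K, i); arr[i] via pyGetD (an out-of-range access is an
-- IndexError, excluded by Pre_get; item = 0 is a ZeroDivisionError, ditto).
def getLoop (arr : List Int) (N : Int) (item : Int) (s : Int) (K : Int) (i : Int) :
    Int × Int :=
  if _h : i < N ∧ 0 < K then
    let s1 := s + PySem.List.pyGetD arr i 0
    if K ≠ 1 ∧ PySem.Int.mod s1 item = 0 then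
      let K1 := K - 1
      let s2 : Int := 0
      let K2 := if i = N - 1 then K1 + 1 else K1
      getLoop arr N item s2 K2 (i + 1)
    else
      getLoop arr N item s1 K (i + 1)
  else (s, K)
termination_by (N - i).toNat
decreasing_by all_goals omega

def get (arr : List Int) (K : Int) (N : Int) (item : Int) : Bool :=
  let r := getLoop arr N item 0 K 0
  if PySem.Int.mod r.1 item = 0 ∧ r.2 = 1 then true else false

-- ===== PORT B =====
-- B's single pass: fold over range(N) (only when K > 0) keeping the cumulative
-- prefix sum and the count of cut points; then decide arithmetically.
def get_alt (arr : List Int) (K : Int) (N : Int) (item : Int) : Bool :=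
  let p : Int × Int :=
    if 0 < K then
      (PySem.List.pyRange 0 N 1).foldl
        (fun (st : Int × Int) (i : Int) =>
          let t := st.1 + PySem.List.pyGetD arr i 0
          (t, if i ≠ N - 1 ∧ PySem.Int.mod t item = 0 then st.2 + 1 else st.2))
        (0, 0)
    else (0, 0)
  decide (PySem.Int.mod p.1 item = 0 ∧ 1 ≤ K ∧ K - 1 ≤ p.2)

-- ===== PRECONDITION & SPEC =====
-- Pre_get excludes exactly the inputs where A raises (ZeroDivisionError on item = 0,
-- IndexError on K > 0 with N > len(arr)); A returns on every other input.
def Pre_get (arr : List Int) (K : Int) (N : Int) (item : Int) : Prop :=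
  item ≠ 0 ∧ (N ≤ arr.length ∨ K ≤ 0)
instance (arr : List Int) (K : Int) (N : Int) (item : Int) : Decidable (Pre_get arr K N item) := by unfold Pre_get; infer_instance
def pvWitness_get : List Int × Int × Int × Int := ([2, 2, 2], 2, 3, 2)

def Spec_get (arr : List Int) (K : Int) (N : Int) (item : Int) (out : Bool) : Prop := out = get_alt arr K N item
instance (arr : List Int) (K : Int) (N : Int) (item : Int) (out : Bool) : Decidable (Spec_get arr K N item out) := by unfold Spec_get; infer_instance

-- ===== CLAIM (what is proved, stated in full; the proofs are below) =====
def Claim_equal_get : Prop := ∀ (arr : List Int) (K : Int) (N : Int) (item : Int), Dom_get arr K N item → Pre_get arr K N item → Spec_get arr K N item (get arr K N item)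

-- ===== LEMMAS AND PROOFS =====

-- Number of valid cut points of list l after an already-accumulated sum s:
-- positions whose running sum is divisible by item, the last position excluded.
def cutCount (item : Int) (s : Int) : List Int → Int
  | [] => 0
  | v :: rest =>
    (if rest ≠ [] ∧ item ∣ (s + v) then 1 else 0) + cutCount item (s + v) rest

theorem cutCount_nonneg (item : Int) : ∀ (l : List Int) (s : Int), 0 ≤ cutCount item s l := by
  intro l
  induction l with
  | nil => intro s; simp [cutCount]
  | cons v rest ih =>
    intro s
    have := ih (s + v)
    simp only [cutCount]
    split_ifs <;> omega

theorem cutCount_shift (item : Int) (s : Int) (h : item ∣ s) :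
    ∀ (l : List Int) (t : Int), cutCount item (s + t) l = cutCount item t l := by
  intro l
  induction l with
  | nil => intro t; rfl
  | cons v rest ih =>
    intro t
    simp only [cutCount]
    have h1 : s + t + v = s + (t + v) := by ring
    rw [h1, ih (t + v)]
    congr 1
    have : item ∣ s + (t + v) ↔ item ∣ t + v := Int.dvd_add_right h
    by_cases hr : rest = [] <;> simp [hr, this]

-- A's loop re-expressed over the list suffix it still has to read (proof-side helper;
-- bridged to the index-based getLoop below).
def loopA (item : Int) : List Int → Int → Int → Int × Int
  | [], s, K => (s, K)
  | v :: rest, s, K =>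
    if 0 < K then
      let s1 := s + v
      if K ≠ 1 ∧ item ∣ s1 then
        if rest = [] then loopA item rest 0 K else loopA item rest 0 (K - 1)
      else loopA item rest s1 K
    else (s, K)

theorem loopA_char (item : Int) : ∀ (l : List Int) (s K : Int), 1 ≤ K →
    ((item ∣ (loopA item l s K).1 ∧ (loopA item l s K).2 = 1) ↔
      (K - 1 ≤ cutCount item s l ∧ item ∣ (s + l.sum))) := by
  intro l
  induction l with
  | nil =>
    intro s K hK
    simp only [loopA, cutCount, List.sum_nil, add_zero]
    constructor
    · rintro ⟨h1, h2⟩; exact ⟨by omega, h1⟩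
    · rintro ⟨h1, h2⟩; exact ⟨h2, by omega⟩
  | cons v rest ih =>
    intro s K hK
    have hKpos : 0 < K := by omega
    simp only [loopA, if_pos hKpos]
    by_cases hc : K ≠ 1 ∧ item ∣ s + v
    · rw [if_pos hc]
      by_cases hr : rest = []
      · subst hr
        rw [if_pos rfl]
        simp only [loopA, cutCount, List.sum_cons, List.sum_nil, add_zero]
        constructor
        · rintro ⟨-, h2⟩; exact absurd h2 hc.1
        · rintro ⟨h1, -⟩; simp at h1; omega
      · rw [if_neg hr]
        rw [ih 0 (K - 1) (by omega)]
        have hsh := cutCount_shift item (s + v) hc.2 rest 0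
        simp only [add_zero] at hsh
        have hdv : item ∣ s + (v + rest.sum) ↔ item ∣ rest.sum := by
          have : s + (v + rest.sum) = (s + v) + rest.sum := by ring
          rw [this]
          exact Int.dvd_add_right hc.2
        simp only [cutCount, List.sum_cons, if_pos (And.intro hr hc.2), hsh, hdv]
        constructor <;> rintro ⟨h1, h2⟩ <;> refine ⟨by omega, ?_⟩
        · simpa using h2
        · simpa using h2
    · rw [if_neg hc]
      rw [ih (s + v) K hK]
      simp only [cutCount, List.sum_cons]
      have hif : (if rest ≠ [] ∧ item ∣ s + v then (1:Int) else 0) = 0 ∨ K = 1 := by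
        by_cases h1 : K = 1
        · right; exact h1
        · left
          have : ¬ item ∣ s + v := fun hd => hc ⟨h1, hd⟩
          simp [this]
      have hsum : s + (v + rest.sum) = s + v + rest.sum := by ring
      rcases hif with h0 | h1
      · rw [h0, zero_add, hsum]
      · subst h1
        have hnn := cutCount_nonneg item rest (s + v)
        have hnn2 := cutCount_nonneg item (v :: rest) s
        simp only [cutCount] at hnn2
        constructor <;> rintro ⟨ha, hb⟩
        · exact ⟨by omega, by rw [hsum]; exact hb⟩
        · exact ⟨by omega, by rw [← hsum]; exact hb⟩

-- Bridge: the index-based port of A equals loopA on the unread suffix of take N arr.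
theorem getLoop_eq_loopA (arr : List Int) (N item : Int) :
    ∀ (fuel : Nat) (i s K : Int), 0 ≤ i → i + fuel = N → N ≤ arr.length →
      getLoop arr N item s K i = loopA item ((arr.take N.toNat).drop i.toNat) s K := by
  intro fuel
  induction fuel with
  | zero =>
    intro i s K h0 hfuel hlen
    have hiN : i = N := by omega
    rw [getLoop]
    have : ¬ (i < N ∧ 0 < K) := by omega
    rw [dif_neg this]
    have hdrop : (arr.take N.toNat).drop i.toNat = [] := by
      apply List.drop_eq_nil_of_le
      simp [List.length_take]
      omega
    rw [hdrop, loopA]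
  | succ fuel ih =>
    intro i s K h0 hfuel hlen
    have hiN : i < N := by omega
    have hitN : i.toNat < (arr.take N.toNat).length := by
      simp [List.length_take]; omega
    have hdrop : (arr.take N.toNat).drop i.toNat =
        (arr.take N.toNat)[i.toNat] :: (arr.take N.toNat).drop (i.toNat + 1) :=
      List.drop_eq_getElem_cons hitN
    have hpy := PySem.List.pyGetD_eq_getElem (xs := arr) (i := i) (d := 0) h0 (by omega)
    have hlast : (i = N - 1) ↔ ((arr.take N.toNat).drop (i.toNat + 1) = []) := by
      rw [List.drop_eq_nil_iff]
      simp [List.length_take]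
      omega
    by_cases hK : 0 < K
    · have hsucc : (i + 1).toNat = i.toNat + 1 := by omega
      have hKif : (if i = N - 1 then K - 1 + 1 else K - 1)
          = (if (arr.take N.toNat).drop (i.toNat + 1) = [] then K else K - 1) := by
        by_cases h : i = N - 1
        · rw [if_pos h, if_pos (hlast.mp h)]; omega
        · rw [if_neg h, if_neg (fun he => h (hlast.mpr he))]
      rw [getLoop, dif_pos (⟨hiN, hK⟩ : i < N ∧ 0 < K), hdrop, loopA, if_pos hK]
      simp only [hpy, List.getElem_take, PySem.Int.mod_eq_zero_iff_dvd, hKif]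
      split_ifs with hcond hr
      · rw [ih (i + 1) 0 K (by omega) (by omega) hlen, hsucc]
      · rw [ih (i + 1) 0 (K - 1) (by omega) (by omega) hlen, hsucc]
      · rw [ih (i + 1) (s + arr[i.toNat]'(by omega)) K (by omega) (by omega) hlen, hsucc]
    · rw [getLoop, dif_neg (by omega : ¬ (i < N ∧ 0 < K)), hdrop, loopA, if_neg hK]

-- B-side bridge: the fold over range(j, N) reading arr[i] computes the total and the
-- cut count of the corresponding suffix of take N arr.
theorem foldB_idx (arr : List Int) (N item : Int) :
    ∀ (fuel : Nat) (j t c : Int), 0 ≤ j → j + fuel = N → N ≤ arr.length →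
      (PySem.List.pyRange j N 1).foldl
        (fun (st : Int × Int) (i : Int) =>
          let tt := st.1 + PySem.List.pyGetD arr i 0
          (tt, if i ≠ N - 1 ∧ PySem.Int.mod tt item = 0 then st.2 + 1 else st.2))
        (t, c)
      = (t + ((arr.take N.toNat).drop j.toNat).sum,
         c + cutCount item t ((arr.take N.toNat).drop j.toNat)) := by
  intro fuel
  induction fuel with
  | zero =>
    intro j t c h0 hfuel hlen
    have hjN : N ≤ j := by omega
    have hdrop : (arr.take N.toNat).drop j.toNat = [] := by
      apply List.drop_eq_nil_of_le
      simp [List.length_take]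
      omega
    rw [PySem.List.pyRange_one_eq_nil hjN, hdrop]
    simp [cutCount]
  | succ fuel ih =>
    intro j t c h0 hfuel hlen
    have hjN : j < N := by omega
    have hjtN : j.toNat < (arr.take N.toNat).length := by
      simp [List.length_take]; omega
    have hdrop : (arr.take N.toNat).drop j.toNat =
        (arr.take N.toNat)[j.toNat] :: (arr.take N.toNat).drop (j.toNat + 1) :=
      List.drop_eq_getElem_cons hjtN
    have hpy := PySem.List.pyGetD_eq_getElem (xs := arr) (i := j) (d := 0) h0 (by omega)
    have hlast : (j ≠ N - 1) ↔ ((arr.take N.toNat).drop (j.toNat + 1) ≠ []) := by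
      rw [not_iff_not, List.drop_eq_nil_iff]
      simp [List.length_take]
      omega
    have hsucc : (j + 1).toNat = j.toNat + 1 := by omega
    rw [PySem.List.pyRange_one_cons hjN, List.foldl_cons]
    simp only [hpy]
    rw [ih (j + 1) (t + arr[j.toNat]'(by omega)) _ (by omega) (by omega) hlen]
    rw [hdrop]
    simp only [cutCount, List.sum_cons, List.getElem_take, hsucc,
      PySem.Int.mod_eq_zero_iff_dvd]
    have hbr : (if (j ≠ N - 1 ∧ item ∣ (t + arr[j.toNat]'(by omega))) then c + 1 else c)
        = c + (if (arr.take N.toNat).drop (j.toNat + 1) ≠ [] ∧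
                  item ∣ (t + arr[j.toNat]'(by omega)) then 1 else 0) := by
      by_cases h1 : (arr.take N.toNat).drop (j.toNat + 1) ≠ [] ∧
          item ∣ (t + arr[j.toNat]'(by omega))
      · rw [if_pos h1, if_pos ⟨hlast.mpr h1.1, h1.2⟩]
      · rw [if_neg h1, if_neg (fun hc => h1 ⟨hlast.mp hc.1, hc.2⟩), add_zero]
    rw [hbr]
    simp only [Prod.mk.injEq]
    constructor <;> ring

-- ===== VERDICT (by name: the statement is the Claim_ definition above) =====
theorem get_spec : Claim_equal_get := by
  intro arr K N item _ hPre
  obtain ⟨hitem, hP⟩ := hPre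
  unfold Spec_get _root_.get get_alt
  by_cases hK : 0 < K
  case neg =>
    -- K ≤ 0: A's loop never runs and B skips the scan; both sides are false
    rw [getLoop, dif_neg (by omega : ¬ ((0:Int) < N ∧ 0 < K))]
    simp only [if_neg hK]
    rw [if_neg (by rintro ⟨-, h⟩; omega : ¬ (PySem.Int.mod (0:Int) item = 0 ∧ K = 1))]
    rw [decide_eq_false (by rintro ⟨-, h, -⟩; omega)]
  case pos =>
    have hlen : N ≤ (arr.length : Int) := by
      rcases hP with h | h
      · exact h
      · omega
    simp only [if_pos hK]
    by_cases hN : 0 ≤ N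
    case neg =>
      -- N < 0: both scans are empty
      have hT : N.toNat = 0 := by omega
      rw [getLoop, dif_neg (by omega : ¬ ((0:Int) < N ∧ 0 < K)),
        PySem.List.pyRange_one_eq_nil (by omega : N ≤ 0)]
      simp only [List.foldl_nil]
      have h0 : PySem.Int.mod (0:Int) item = 0 :=
        (PySem.Int.mod_eq_zero_iff_dvd 0 item).mpr (dvd_zero item)
      by_cases h1 : K = 1
      · rw [if_pos ⟨h0, h1⟩, decide_eq_true ⟨h0, by omega, by omega⟩]
      · rw [if_neg (by rintro ⟨-, h⟩; exact h1 h), decide_eq_false (by rintro ⟨-, -, h⟩; omega)]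
    case pos =>
      rw [getLoop_eq_loopA arr N item N.toNat 0 0 K le_rfl (by omega) hlen]
      rw [foldB_idx arr N item N.toNat 0 0 0 le_rfl (by omega) hlen]
      simp only [Int.toNat_zero, List.drop_zero, zero_add]
      have hA := loopA_char item (arr.take N.toNat) 0 K (by omega)
      simp only [zero_add] at hA
      by_cases hres : item ∣ (loopA item (arr.take N.toNat) 0 K).1 ∧
          (loopA item (arr.take N.toNat) 0 K).2 = 1
      · obtain ⟨hc1, hc2⟩ := hA.mp hres
        rw [if_pos ⟨(PySem.Int.mod_eq_zero_iff_dvd _ _).mpr hres.1, hres.2⟩]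
        rw [decide_eq_true ⟨(PySem.Int.mod_eq_zero_iff_dvd _ _).mpr hc2, by omega, hc1⟩]
      · rw [if_neg (fun hc => hres ⟨(PySem.Int.mod_eq_zero_iff_dvd _ _).mp hc.1, hc.2⟩)]
        rw [decide_eq_false (fun hc => hres (hA.mpr
          ⟨hc.2.2, (PySem.Int.mod_eq_zero_iff_dvd _ _).mp hc.1⟩))]
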